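-- pv_equiv track=rewrite | github.com/the-riviera-kid/dojo-of-panic | session-two-word-stars/build_word_star.py | build_word_star
-- ===== SOURCE A (Python) =====
-- def build_word_star(word):
--     return_value = []
--     grid_size = len(word) * 2 - 1
--     centre_location = grid_size - len(word)
--     for row_index in range(grid_size):
--         row_string = ""
--         for column_index in range(grid_size):
--             if row_index == column_index and row_index == centre_location:
--                 row_string += word[0]
--             elif row_index == centre_location:
--                 distance = abs(centre_location - column_index)
--                 row_string += word[distance]
--             elif column_index == centre_location:
--                 distance = abs(centre_location - row_index)
--                 row_string += word[distance]
--             else: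
--                 row_string += "."
--         return_value.append(row_string)
--
--
--     return return_value
-- ===== SOURCE B (Python) =====
-- def build_word_star(word):
--     n = len(word)
--     centre = n - 1
--     rows = []
--     for i in range(2 * n - 1):
--         d = abs(centre - i)
--         if d == 0:
--             rows.append(word[::-1] + word[1:])
--         else:
--             rows.append("." * centre + word[d] + "." * centre)
--     return rows
-- ===== Notes on version B (the rewrite author's own statement) =====
-- stated objective: simpler
-- what changed: Replaced the nested row x column loop (O(n^2) branch tests per cell) with a single loop over rows that builds each row directly: the middle row once as word[::-1]+word[1:], every other row as dots around one letter.
import Mathlib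
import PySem

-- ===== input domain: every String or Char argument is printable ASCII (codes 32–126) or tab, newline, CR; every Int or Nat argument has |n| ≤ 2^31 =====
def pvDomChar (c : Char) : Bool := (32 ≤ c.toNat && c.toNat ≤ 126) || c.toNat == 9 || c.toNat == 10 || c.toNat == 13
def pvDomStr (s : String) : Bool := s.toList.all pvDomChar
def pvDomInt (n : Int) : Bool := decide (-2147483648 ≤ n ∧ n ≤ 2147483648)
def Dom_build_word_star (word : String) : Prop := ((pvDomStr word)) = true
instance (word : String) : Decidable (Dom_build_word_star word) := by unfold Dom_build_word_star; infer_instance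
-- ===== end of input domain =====

-- B replaces A's nested row×column loop with one loop over rows building each row directly.

-- ===== PORT A =====
-- inner column loop of A, on the char list of the word
def bwsRowA (w : List Char) (centre grid_size i : Int) : List Char :=
  (PySem.List.pyRange 0 grid_size 1).foldl (fun row_string j =>
    if i == j && i == centre then row_string ++ [PySem.List.pyGetD w 0 ' ']
    else if i == centre then row_string ++ [PySem.List.pyGetD w (|centre - j|) ' ']
    else if j == centre then row_string ++ [PySem.List.pyGetD w (|centre - i|) ' ']
    else row_string ++ ['.']) []

def build_word_star (word : String) : List String :=
  let w := word.toList
  let grid_size : Int := (w.length : Int) * 2 - 1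
  let centre : Int := grid_size - (w.length : Int)
  (PySem.List.pyRange 0 grid_size 1).foldl
    (fun return_value i => return_value ++ [String.ofList (bwsRowA w centre grid_size i)]) []

-- ===== PORT B =====
def build_word_star_alt (word : String) : List String :=
  let w := word.toList
  let n : Int := (w.length : Int)
  let centre : Int := n - 1
  (PySem.List.pyRange 0 (2 * n - 1) 1).foldl
    (fun rows i =>
      let d : Int := |centre - i|
      if d == 0 then
        rows ++ [String.ofList (((PySem.List.slice? w none none (-1)).getD []) ++ PySem.List.slice w (some 1) none)]
      else
        rows ++ [String.ofList (PySem.List.pyRepeat ['.'] centre ++ [PySem.List.pyGetD w d ' '] ++ PySem.List.pyRepeat ['.'] centre)]) []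

-- ===== PRECONDITION & SPEC =====
def Spec_build_word_star (word : String) (out : List String) : Prop := out = build_word_star_alt word
instance (word : String) (out : List String) : Decidable (Spec_build_word_star word out) := by unfold Spec_build_word_star; infer_instance

-- ===== CLAIM (what is proved, stated in full; the proofs are below) =====
def Claim_equal_build_word_star : Prop := ∀ (word : String), Dom_build_word_star word → Spec_build_word_star word (build_word_star word)

-- ===== LEMMAS AND PROOFS =====

-- A's inner loop as a map over the column range
lemma rowA_eq_map (w : List Char) (c g i : Int) :
    bwsRowA w c g i = (PySem.List.pyRange 0 g 1).map (fun j =>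
      if i == j && i == c then PySem.List.pyGetD w 0 ' '
      else if i == c then PySem.List.pyGetD w (|c - j|) ' '
      else if j == c then PySem.List.pyGetD w (|c - i|) ' '
      else '.') := by
  unfold bwsRowA
  rw [show (fun (row_string : List Char) (j : Int) =>
      if i == j && i == c then row_string ++ [PySem.List.pyGetD w 0 ' ']
      else if i == c then row_string ++ [PySem.List.pyGetD w (|c - j|) ' ']
      else if j == c then row_string ++ [PySem.List.pyGetD w (|c - i|) ' ']
      else row_string ++ ['.'])
    = (fun (row_string : List Char) (j : Int) => row_string ++
        [if i == j && i == c then PySem.List.pyGetD w 0 ' '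
         else if i == c then PySem.List.pyGetD w (|c - j|) ' '
         else if j == c then PySem.List.pyGetD w (|c - i|) ' '
         else '.']) from by funext s j; split_ifs <;> rfl]
  rw [PySem.List.foldl_append_singleton_eq_map]
  rfl

-- the middle row: distances from the centre read the word reversed then its tail
lemma mid_eq (w : List Char) (h1 : 1 ≤ w.length) :
    (List.range (2*w.length-1)).map
      (fun (j : Nat) => PySem.List.pyGetD w (|((w.length:Int)-1) - ((j:Nat):Int)|) ' ')
      = w.reverse ++ w.tail := by
  apply List.ext_getElem
  · simp; omega
  intro j hj _
  simp only [List.getElem_map, List.getElem_range]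
  simp only [List.length_map, List.length_range] at hj
  by_cases hc : j < w.length
  · rw [List.getElem_append_left (by simpa using hc)]
    rw [show |((w.length:Int)-1) - ((j:Nat):Int)| = ((w.length - 1 - j : Nat) : Int) by
      rw [abs_of_nonneg (by omega)]; omega]
    rw [PySem.List.pyGetD_natCast, List.getElem_reverse]
    exact List.getD_eq_getElem w ' ' (by omega)
  · rw [List.getElem_append_right (by simpa using hc)]
    rw [show |((w.length:Int)-1) - ((j:Nat):Int)| = ((j - w.length + 1 : Nat) : Int) by
      rw [abs_of_nonpos (by omega)]; omega]
    rw [PySem.List.pyGetD_natCast]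
    rw [List.getD_eq_getElem w ' ' (by omega)]
    simp only [List.getElem_tail, List.length_reverse]

-- a non-centre row: a single letter at the centre column, dots elsewhere
lemma side_eq (n : Nat) (c : Char) (h1 : 1 ≤ n) :
    (List.range (2*n-1)).map (fun j => if j = n-1 then c else '.')
      = List.replicate (n-1) '.' ++ [c] ++ List.replicate (n-1) '.' := by
  apply List.ext_getElem
  · simp; omega
  intro j hj _
  simp only [List.getElem_map, List.getElem_range]
  rcases lt_trichotomy j (n-1) with h | h | h
  · rw [if_neg (by omega)]
    rw [List.getElem_append_left (by simp; omega), List.getElem_append_left (by simp; omega),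
      List.getElem_replicate]
  · rw [if_pos h]
    rw [List.getElem_append_left (by simp; omega), List.getElem_append_right (by simp; omega)]
    simp [List.getElem_singleton]
  · rw [if_neg (by omega)]
    rw [List.getElem_append_right (by simp; omega), List.getElem_replicate]

theorem key (word : String) : build_word_star word = build_word_star_alt word := by
  unfold build_word_star build_word_star_alt
  set w := word.toList with hw
  by_cases hn : w.length = 0
  · simp only [hn, Nat.cast_zero]
    norm_num
  · have h1 : 1 ≤ w.length := by omega
    have hg : ((w.length:Int))*2-1 = ((2*w.length-1 : Nat):Int) := by omega
    have hg' : 2*((w.length:Int))-1 = ((2*w.length-1 : Nat):Int) := by omega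
    have hc : ((w.length:Int))*2-1 - (w.length:Int) = ((w.length:Int))-1 := by ring
    simp only [hg, hg', PySem.List.pyRange_zero_natCast]
    rw [PySem.List.foldl_append_singleton_eq_map]
    rw [show (fun (rows : List String) (i : Int) =>
        if (|(w.length:Int) - 1 - i| == 0) = true then
          rows ++ [String.ofList ((PySem.List.slice? w none none (-1)).getD [] ++ PySem.List.slice w (some 1) none)]
        else
          rows ++ [String.ofList (PySem.List.pyRepeat ['.'] ((w.length:Int) - 1) ++
              [PySem.List.pyGetD w (|(w.length:Int) - 1 - i|) ' '] ++ PySem.List.pyRepeat ['.'] ((w.length:Int) - 1))])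
      = (fun (rows : List String) (i : Int) => rows ++
          [if (|(w.length:Int) - 1 - i| == 0) = true then
            String.ofList ((PySem.List.slice? w none none (-1)).getD [] ++ PySem.List.slice w (some 1) none)
          else
            String.ofList (PySem.List.pyRepeat ['.'] ((w.length:Int) - 1) ++
              [PySem.List.pyGetD w (|(w.length:Int) - 1 - i|) ' '] ++ PySem.List.pyRepeat ['.'] ((w.length:Int) - 1))])
      from by funext r i; split_ifs <;> rfl]
    rw [PySem.List.foldl_append_singleton_eq_map]
    simp only [List.map_map, List.nil_append]
    apply List.map_congr_left
    intro k hk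
    simp only [List.mem_range] at hk
    simp only [Function.comp_apply]
    have hcen : ((2 * w.length - 1 : Nat) : Int) - (w.length : Int) = (w.length : Int) - 1 := by omega
    rw [hcen, rowA_eq_map, PySem.List.pyRange_zero_natCast, List.map_map]
    by_cases hk1 : k = w.length - 1
    · -- middle row
      have hpos : (|(w.length:Int) - 1 - (k:Int)| == 0) = true := by
        simp only [beq_iff_eq, abs_eq_zero]; omega
      rw [if_pos hpos, PySem.List.slice?_none_none_neg_one, PySem.List.slice_from_one]
      simp only [Option.getD_some]
      congr 1
      rw [← mid_eq w h1]
      apply List.map_congr_left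
      intro j hj
      simp only [List.mem_range] at hj
      simp only [Function.comp_apply, beq_iff_eq]
      have hkc : ((k:Nat):Int) = (w.length:Int) - 1 := by omega
      by_cases hkj : ((k:Nat):Int) = ((j:Nat):Int)
      · rw [if_pos (by simp only [Bool.and_eq_true, beq_iff_eq]; omega), show |(w.length:Int) - 1 - ((j:Nat):Int)| = 0 by
          rw [abs_eq_zero]; omega]
      · rw [if_neg (by intro hco; simp only [Bool.and_eq_true, beq_iff_eq] at hco; omega), if_pos hkc]
    · -- side row
      have hneg : (|(w.length:Int) - 1 - (k:Int)| == 0) = true → False := by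
        simp only [beq_iff_eq, abs_eq_zero]; omega
      rw [if_neg hneg]
      congr 1
      rw [PySem.List.pyRepeat_singleton, show (((w.length:Int) - 1)).toNat = w.length - 1 by omega]
      rw [← side_eq w.length (PySem.List.pyGetD w (|(w.length:Int) - 1 - (k:Int)|) ' ') h1]
      apply List.map_congr_left
      intro j hj
      simp only [List.mem_range] at hj
      simp only [Function.comp_apply, beq_iff_eq]
      have hknec : ¬ ((k:Nat):Int) = (w.length:Int) - 1 := by omega
      rw [if_neg (by intro hco; simp only [Bool.and_eq_true, beq_iff_eq] at hco; omega), if_neg hknec]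
      by_cases hjc : j = w.length - 1
      · rw [if_pos (by omega : ((j:Nat):Int) = (w.length:Int) - 1), if_pos hjc]
      · rw [if_neg (by omega : ¬ ((j:Nat):Int) = (w.length:Int) - 1), if_neg hjc]

-- ===== VERDICT (by name: the statement is the Claim_ definition above) =====
theorem build_word_star_spec : Claim_equal_build_word_star := by
  intro word _
  unfold Spec_build_word_star
  exact key word
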